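-- pv_equiv track=rewrite | github.com/ferotimk/zapoctovy-program | matrix.py | is_pos_semidef
-- ===== SOURCE A (Python) =====
-- def matrix_height(A):
--     if A == False:
--         return 0
--     else:
--         return len(A)
--
-- def matrix_width(A):
--     if  A == False:
--         return 0
--     else:
--         return len(A[0])
--
-- def is_square(A):
--     if matrix_height(A) == matrix_width(A):
--         return True
--     else:
--         return False
--
-- def submatrix(A, i, j):
--     #vrati podmatici vzniklou vynechanim i-teho radku a j-teho sloupce
--     m = matrix_height(A)
--     n = matrix_width(A)
--     #zde si vytvarime kopii matice, jinak by fce zmenila puvodni matici misto vraceni nove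
--     B = [[0 for o in range(n)] for p in range(m)]
--     for x in range(m):
--         for l in range(n):
--             B[x][l] = A[x][l]
--     B.pop(i)
--     for k in range(n - 1):
--         B[k].pop(j)
--     return B
--
-- def determinant_2(A, det = 0):
--     #vypocet determinanatu pomoci rozvoje podle prvniho radku (pro zajimavost)
--     if is_square(A) == False:
--         return False
--     else:
--         n = matrix_height(A)
--         if n == 1:
--             return A[0][0]
--         else:
--             n = matrix_width(A)
--             for i in range(n):
--                 det += (A[0][i])*((-1)**i)*determinant_2(submatrix(A, 0, i))
--             return det
--
-- def is_pos_semidef(A):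
--     if is_square(A) == False:
--         return False
--     else:
--         n = matrix_width(A)
--         B = [[0 for o in range(n)] for p in  range(n)]
--         for x in range(n):
--             for l in range(n):
--                 B[x][l] = A[x][l]
--         a = 0
--         for i in range(n):
--             det = determinant_2(B)
--             if det < 0:
--                 a += 1
--                 break
--             B = submatrix(B, 0, 0)
--         if a == 0:
--             return True
--         else:
--             return False
-- ===== SOURCE B (Python) =====
-- def is_pos_semidef(A):
--     # Leibniz-style determinant via recursion over remaining column indices
--     # (no submatrix copying); checks every trailing principal minor.
--     if not A or len(A) != len(A[0]):
--         return False
--     n = len(A)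
--     return all(_det([row[k:n] for row in A[k:]]) >= 0 for k in range(n))
--
-- def _det(mat):
--     def go(r, cols):
--         if not cols:
--             return 1
--         return sum((-1) ** t * mat[r][cols[t]] * go(r + 1, cols[:t] + cols[t + 1:])
--                    for t in range(len(cols)))
--     return go(0, list(range(len(mat))))
-- ===== Notes on version B (the rewrite author's own statement) =====
-- stated objective: alternative
-- what changed: Replaces A's recursive cofactor expansion with full submatrix copying (copy+pop per minor, rebuilt from scratch for each trailing principal minor) by a Leibniz-style recursion over a list of remaining column indices that never materialises submatrices, and the breaking counter loop by all() over the trailing minors.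
import Mathlib
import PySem

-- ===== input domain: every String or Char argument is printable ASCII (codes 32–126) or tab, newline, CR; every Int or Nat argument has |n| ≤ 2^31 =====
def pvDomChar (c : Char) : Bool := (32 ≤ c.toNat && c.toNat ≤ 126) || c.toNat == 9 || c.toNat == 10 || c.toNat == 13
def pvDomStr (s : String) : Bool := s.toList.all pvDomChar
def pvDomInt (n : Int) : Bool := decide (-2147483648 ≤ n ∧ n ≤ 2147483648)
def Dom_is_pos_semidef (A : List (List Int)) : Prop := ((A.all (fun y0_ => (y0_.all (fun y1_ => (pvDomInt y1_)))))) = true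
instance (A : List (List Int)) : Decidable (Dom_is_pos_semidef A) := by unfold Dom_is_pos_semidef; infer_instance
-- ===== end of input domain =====

-- B replaces A's copy-and-pop cofactor recursion by a Leibniz-style recursion over a list
-- of remaining column indices (no submatrix copies); same exact results on Pre_.

-- ===== PORT A =====
-- Python list indices in A are produced by range() and are in range on every input
-- Pre_ admits (and on every matrix A's recursion builds from one), so indexing is
-- ported as getD; matrix_width(A) = len(A[0]) raises on A = [], which Pre_ excludes.
def matHeightA (A : List (List Int)) : Nat := A.length      -- 'A == False' is false for every list

def matWidthA (A : List (List Int)) : Nat := (A.getD 0 []).length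

def isSquareA (A : List (List Int)) : Bool := matHeightA A == matWidthA A

-- submatrix(A, i, j): copy of A (m×n read through indices), pop row i, pop column j of the first n-1 rows
def submatrixA (A : List (List Int)) (i j : Nat) : List (List Int) :=
  let m := matHeightA A
  let n := matWidthA A
  let B := (List.range m).map (fun x => (List.range n).map (fun l => (A.getD x []).getD l 0))
  let B := B.eraseIdx i
  (List.range B.length).map (fun k => if k < n - 1 then (B.getD k []).eraseIdx j else B.getD k [])

-- determinant_2: cofactor expansion along the first row.  The fuel argument only bounds the
-- recursion depth (Python recursion needs none); every call below passes height+1, which is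
-- exact on every reachable call.  Python returns False when not square; False compares and
-- adds as 0 at every use site, so the port returns 0 there.
def det2A : Nat → List (List Int) → Int → Int
  | 0, _, det => det
  | fuel+1, A, det =>
    if isSquareA A = false then 0
    else
      let n := matHeightA A
      if n = 1 then (A.getD 0 []).getD 0 0
      else
        let n := matWidthA A
        (List.range n).foldl
          (fun d i => d + (A.getD 0 []).getD i 0 * (-1 : Int) ^ i * det2A fuel (submatrixA A 0 i) 0) det

-- the for-loop over i in range(n) with its break (a = 1): true iff some det < 0 was hit
def loopA : List (List Int) → Nat → Bool
  | _, 0 => false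
  | B, i+1 =>
    let det := det2A (B.length + 1) B 0
    if det < 0 then true else loopA (submatrixA B 0 0) i

def is_pos_semidef (A : List (List Int)) : Bool :=
  if isSquareA A = false then false
  else
    let n := matWidthA A
    let B := (List.range n).map (fun x => (List.range n).map (fun l => (A.getD x []).getD l 0))
    if loopA B n then false else true

-- ===== PORT B =====
-- go(r, cols): Leibniz recursion of Source B; cols[:t] + cols[t+1:] is take/drop (t is in range);
-- fuel bounds the recursion depth only (every call passes length+1, exact on reachable calls);
-- all Python indices here are nonnegative range values, ported as Nat with getD.
def goB (mat : List (List Int)) : Nat → Nat → List Nat → Int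
  | 0, _, _ => 0
  | fuel+1, r, cols =>
    if cols = [] then 1
    else
      (List.range cols.length).foldl
        (fun s t => s + (-1 : Int) ^ t * (mat.getD r []).getD (cols.getD t 0) 0 *
          goB mat fuel (r + 1) (cols.take t ++ cols.drop (t + 1))) 0

def detB (mat : List (List Int)) : Int := goB mat (mat.length + 1) 0 (List.range mat.length)

def is_pos_semidef_alt (A : List (List Int)) : Bool :=
  if A = [] ∨ A.length ≠ (A.getD 0 []).length then false
  else
    let n := A.length
    (List.range n).all (fun k => decide (0 ≤ detB ((A.drop k).map (fun row => (row.take n).drop k))))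

-- ===== PRECONDITION & SPEC =====
-- Pre_ excludes exactly the inputs where Python A raises IndexError: the empty list
-- (len(A[0])) and matrices that pass the square test len(A) == len(A[0]) but have some
-- row shorter than n, which the copy loop then indexes out of range.
def Pre_is_pos_semidef (A : List (List Int)) : Prop :=
  A ≠ [] ∧ (A.length = (A.getD 0 []).length → ∀ row ∈ A, A.length ≤ row.length)
instance (A : List (List Int)) : Decidable (Pre_is_pos_semidef A) := by
  unfold Pre_is_pos_semidef; infer_instance

def pvWitness_is_pos_semidef : List (List Int) := [[2, 0], [0, 3]]

def Spec_is_pos_semidef (A : List (List Int)) (out : Bool) : Prop := out = is_pos_semidef_alt A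
instance (A : List (List Int)) (out : Bool) : Decidable (Spec_is_pos_semidef A out) := by
  unfold Spec_is_pos_semidef; infer_instance

-- ===== CLAIM (what is proved, stated in full; the proofs are below) =====
def Claim_equal_is_pos_semidef : Prop :=
  ∀ (A : List (List Int)), Dom_is_pos_semidef A → Pre_is_pos_semidef A →
    Spec_is_pos_semidef A (is_pos_semidef A)

-- ===== LEMMAS AND PROOFS =====

-- exact rectangular shape: m rows, each of length n
def Rect (M : List (List Int)) (m n : Nat) : Prop :=
  M.length = m ∧ ∀ row ∈ M, row.length = n

-- the submatrix of mat with rows r.. and the columns listed in cols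
def sel (mat : List (List Int)) (r : Nat) (cols : List Nat) : List (List Int) :=
  (mat.drop r).map (fun row => cols.map (fun j => row.getD j 0))

lemma sel_rect (mat : List (List Int)) (r : Nat) (cols : List Nat) :
    Rect (sel mat r cols) (mat.length - r) cols.length := by
  constructor
  · simp [sel]
  · intro row hrow
    simp only [sel, List.mem_map] at hrow
    obtain ⟨x, -, rfl⟩ := hrow
    simp

lemma rowcopy (row : List Int) (n : Nat) (h : n ≤ row.length) :
    (List.range n).map (fun l => row.getD l 0) = row.take n := by
  apply List.ext_getElem
  · simp [h]
  · intro l h1 h2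
    have hl : l < row.length := by simp at h1; omega
    simp [List.getD_eq_getElem?_getD, hl]

lemma mapcopy {α : Type} (M : List (List Int)) (g : List Int → α) :
    (List.range M.length).map (fun x => g (M.getD x [])) = M.map g := by
  apply List.ext_getElem
  · simp
  · intro x h1 h2
    have hx : x < M.length := by simpa using h1
    simp [List.getD_eq_getElem?_getD, hx]

lemma copy_eq (M : List (List Int)) (m n : Nat) (h : Rect M m n) :
    (List.range m).map (fun x => (List.range n).map (fun l => (M.getD x []).getD l 0)) = M := by
  obtain ⟨hm, hrows⟩ := h
  subst hm
  rw [mapcopy M (fun row => (List.range n).map (fun l => row.getD l 0))]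
  conv_rhs => rw [← List.map_id M]
  apply List.map_congr_left
  intro row hrow
  rw [rowcopy row n (le_of_eq (hrows row hrow).symm)]
  simp [hrows row hrow]

lemma width_rect (M : List (List Int)) (m n : Nat) (h : Rect M m n) (hm : 1 ≤ m) :
    matWidthA M = n := by
  obtain ⟨hlen, hrows⟩ := h
  have hx : 0 < M.length := by omega
  have : M.getD 0 [] = M[0] := by
    simp [List.getD_eq_getElem?_getD, hx]
  rw [matWidthA, this]
  exact hrows _ (List.getElem_mem hx)

lemma submatrixA_sq (M : List (List Int)) (m : Nat) (j : Nat) (h : Rect M m m) (hm : 1 ≤ m) :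
    submatrixA M 0 j = M.tail.map (fun r => r.eraseIdx j) := by
  have hw : matWidthA M = m := width_rect M m m h hm
  have hh : matHeightA M = m := h.1
  rw [submatrixA]
  simp only [hw, hh, copy_eq M m m h, List.eraseIdx_zero]
  have hlen : M.tail.length = m - 1 := by simp [h.1]
  have : ∀ k ∈ List.range M.tail.length,
      (if k < m - 1 then (M.tail.getD k []).eraseIdx j else M.tail.getD k []) =
        (M.tail.getD k []).eraseIdx j := by
    intro k hk
    simp only [List.mem_range, hlen] at hk
    simp [hk]
  rw [List.map_congr_left this, mapcopy M.tail (fun r => r.eraseIdx j)]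

lemma getD_map_nat (c : List Nat) (g : Nat → Int) (t : Nat) (ht : t < c.length) :
    (c.map g).getD t 0 = g (c.getD t 0) := by
  rw [List.getD_eq_getElem?_getD, List.getD_eq_getElem?_getD, List.getElem?_map,
    List.getElem?_eq_getElem ht]
  rfl

lemma sel_row0 (mat : List (List Int)) (r : Nat) (cols : List Nat) (hr : r < mat.length) :
    (sel mat r cols).getD 0 [] = cols.map (fun j => (mat.getD r []).getD j 0) := by
  have h0 : 0 < (mat.drop r).length := by simp; omega
  simp [sel, List.getD_eq_getElem?_getD, hr]

lemma sel_tail (mat : List (List Int)) (r : Nat) (cols : List Nat) (i : Nat) :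
    (sel mat r cols).tail.map (fun rr => rr.eraseIdx i) = sel mat (r + 1) (cols.eraseIdx i) := by
  simp only [sel, ← List.map_tail, List.tail_drop, List.map_map]
  apply List.map_congr_left
  intro row _
  simp [List.eraseIdx_map]

-- core: goB computes A's cofactor determinant of the selected submatrix
lemma goB_eq_det2 (mat : List (List Int)) :
    ∀ fuel r (cols : List Nat), cols.length ≠ 0 → cols.length = mat.length - r →
      cols.length < fuel →
      goB mat fuel r cols = det2A (cols.length + 1) (sel mat r cols) 0 := by
  intro fuel
  induction fuel with
  | zero => intro r cols _ _ hf; omega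
  | succ fuel ih =>
    intro r cols hne hlen hf
    have hr : r < mat.length := by omega
    have hrect : Rect (sel mat r cols) cols.length cols.length := by
      have := sel_rect mat r cols
      rw [← hlen] at this; exact this
    have hsq : isSquareA (sel mat r cols) = true := by
      simp [isSquareA, matHeightA, hrect.1, width_rect _ _ _ hrect (by omega)]
    have hrow0 := sel_row0 mat r cols hr
    match cols, hne, hlen, hf, hrect, hsq, hrow0 with
    | [j], hne, hlen, hf, hrect, hsq, hrow0 =>
      -- 1×1 case: both sides are mat[r][j]
      have h1 : (sel mat r [j]).length = 1 := hrect.1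
      have hfuel : 1 ≤ fuel := by omega
      obtain ⟨fuel, rfl⟩ : ∃ f, fuel = f + 1 := ⟨fuel - 1, by omega⟩
      have h0lt : 0 < (sel mat r [j]).length := by omega
      have e0 : (sel mat r [j])[0] = List.map (fun j => (mat.getD r []).getD j 0) [j] := by
        rw [← hrow0]; simp [List.getD_eq_getElem?_getD, h0lt]
      simp [goB, det2A, hsq, matHeightA, h1, e0, List.getD_eq_getElem?_getD]
    | j0 :: j1 :: rest, hne, hlen, hf, hrect, hsq, hrow0 =>
      -- size ≥ 2: cofactor expansion on both sides, term by term
      have hS1 : matHeightA (sel mat r (j0 :: j1 :: rest)) = (j0 :: j1 :: rest).length :=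
        hrect.1
      have hwS : matWidthA (sel mat r (j0 :: j1 :: rest)) = (j0 :: j1 :: rest).length :=
        width_rect _ _ _ hrect (by simp)
      simp only [goB, det2A, hsq, hS1, hwS]
      rw [if_neg (by simp), if_neg (by simp)]
      apply PySem.List.foldl_congr_mem
      intro acc t ht
      have htl : t < (j0 :: j1 :: rest).length := List.mem_range.mp ht
      have e1 : ((sel mat r (j0 :: j1 :: rest)).getD 0 []).getD t 0 =
          (mat.getD r []).getD ((j0 :: j1 :: rest).getD t 0) 0 := by
        rw [hrow0]
        exact getD_map_nat _ _ t htl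
      have e2 : submatrixA (sel mat r (j0 :: j1 :: rest)) 0 t =
          sel mat (r + 1) ((j0 :: j1 :: rest).eraseIdx t) := by
        rw [submatrixA_sq _ (j0 :: j1 :: rest).length t hrect (by simp), sel_tail]
      have e3 : (j0 :: j1 :: rest).take t ++ (j0 :: j1 :: rest).drop (t + 1) =
          (j0 :: j1 :: rest).eraseIdx t := (List.eraseIdx_eq_take_drop_succ _ _).symm
      have hel : ((j0 :: j1 :: rest).eraseIdx t).length = (j0 :: j1 :: rest).length - 1 :=
        List.length_eraseIdx_of_lt htl
      have hcl : (j0 :: j1 :: rest).length = rest.length + 2 := by simp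
      have e4 := ih (r + 1) ((j0 :: j1 :: rest).eraseIdx t)
        (by rw [hel]; omega) (by rw [hel]; omega) (by rw [hel]; omega)
      have e5 : ((j0 :: j1 :: rest).eraseIdx t).length + 1 = (j0 :: j1 :: rest).length := by
        rw [hel]; omega
      rw [e5] at e4
      rw [e1, e2, e3, e4]
      ring

lemma sel_self (M : List (List Int)) (m : Nat) (h : Rect M m m) :
    sel M 0 (List.range M.length) = M := by
  simp only [sel, List.drop_zero]
  conv_rhs => rw [← List.map_id M]
  apply List.map_congr_left
  intro row hrow
  have hrl : row.length = m := h.2 row hrow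
  rw [rowcopy row M.length (by rw [hrl, h.1])]
  simp [hrl, h.1]

lemma det_eq (M : List (List Int)) (m : Nat) (h : Rect M m m) (hm : 1 ≤ m) :
    det2A (M.length + 1) M 0 = detB M := by
  rw [detB, goB_eq_det2 M (M.length + 1) 0 (List.range M.length)
    (by simp [h.1]; omega) (by simp) (by simp), sel_self M m h]
  simp

-- the trailing principal submatrix B computes for index k
def trail (A : List (List Int)) (k n : Nat) : List (List Int) :=
  (A.drop k).map (fun row => (row.take n).drop k)

lemma trail_rect (A : List (List Int)) (k n : Nat) (hA : A.length = n)
    (hrows : ∀ row ∈ A, n ≤ row.length) (hk : k ≤ n) :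
    Rect (trail A k n) (n - k) (n - k) := by
  constructor
  · simp [trail, hA]
  · intro row hrow
    simp only [trail, List.mem_map] at hrow
    obtain ⟨r, hr, rfl⟩ := hrow
    have := hrows r (List.mem_of_mem_drop hr)
    simp; omega

lemma trail_succ (A : List (List Int)) (k n : Nat) (hA : A.length = n)
    (hrows : ∀ row ∈ A, n ≤ row.length) (hk : k < n) :
    submatrixA (trail A k n) 0 0 = trail A (k + 1) n := by
  have hrect := trail_rect A k n hA hrows (le_of_lt hk)
  rw [submatrixA_sq _ (n - k) 0 hrect (by omega)]
  simp only [trail, ← List.map_tail, List.tail_drop, List.map_map]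
  apply List.map_congr_left
  intro row _
  simp [List.eraseIdx_zero, List.tail_drop]

lemma ite_bool_flip (b : Bool) : (if b = true then false else true) = !b := by
  cases b <;> rfl

lemma loop_eq (A : List (List Int)) (n : Nat) (hA : A.length = n)
    (hrows : ∀ row ∈ A, n ≤ row.length) :
    ∀ m k, k + m = n →
      loopA (trail A k n) m =
        !((List.range' k m).all (fun i => decide (0 ≤ detB (trail A i n)))) := by
  intro m
  induction m with
  | zero => intro k hk; simp [loopA]
  | succ m ih =>
    intro k hk
    have hkn : k < n := by omega
    have hrect := trail_rect A k n hA hrows (by omega)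
    have hdet : det2A ((trail A k n).length + 1) (trail A k n) 0 = detB (trail A k n) :=
      det_eq _ (n - k) hrect (by omega)
    rw [loopA, List.range'_succ]
    by_cases hneg : detB (trail A k n) < 0
    · simp [hdet, hneg]
    · have h0 : (0 : Int) ≤ detB (trail A k n) := by omega
      simp only [hdet, if_neg hneg, trail_succ A k n hA hrows hkn, ih (k + 1) (by omega),
        List.all_cons, decide_eq_true h0, Bool.true_and]

-- ===== VERDICT (by name: the statement is the Claim_ definition above) =====
theorem is_pos_semidef_spec : Claim_equal_is_pos_semidef := by
  intro A _ hpre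
  obtain ⟨hne, hrows'⟩ := hpre
  show is_pos_semidef A = is_pos_semidef_alt A
  by_cases heq : A.length = (A.getD 0 []).length
  · -- square case
    have hn1 : 1 ≤ A.length := List.length_pos_of_ne_nil hne
    have hrows : ∀ row ∈ A, A.length ≤ row.length := hrows' heq
    have hsqA : isSquareA A = true := by
      simp [isSquareA, matHeightA, matWidthA, heq]
    have hw : matWidthA A = A.length := heq.symm
    have hcopy : (List.range A.length).map
        (fun x => (List.range A.length).map (fun l => (A.getD x []).getD l 0)) =
        trail A 0 A.length := by
      rw [mapcopy A (fun row => (List.range A.length).map (fun l => row.getD l 0))]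
      apply List.map_congr_left
      intro row hrow
      rw [rowcopy row A.length (hrows row hrow)]
      rw [List.drop_zero]
    have hcond : ¬(A = [] ∨ A.length ≠ (A.getD 0 []).length) := by
      intro h; rcases h with h | h
      · exact hne h
      · exact h heq
    rw [is_pos_semidef, if_neg (by simp [hsqA])]
    rw [is_pos_semidef_alt, if_neg hcond]
    simp only [hw, hcopy]
    rw [ite_bool_flip, loop_eq A A.length rfl hrows A.length 0 (by omega), Bool.not_not,
      List.range_eq_range']
    simp only [trail]
    rfl
  · -- not square: both sides are false
    have hsqA : isSquareA A = false := by
      simp only [isSquareA, matHeightA, matWidthA]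
      simpa using heq
    rw [is_pos_semidef, if_pos (by simp [hsqA]), is_pos_semidef_alt,
      if_pos (Or.inr heq)]
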